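-- pv_equiv track=rewrite | github.com/tomascosta29/CatoScan | src/checks/audit_network_changes.py | _normalize_watch_target
-- ===== SOURCE A (Python) =====
-- def _normalize_watch_target(path_pattern: str) -> str:
--     """Normalize glob path pattern to an audit watch target."""
--     wildcard_indices = [
--         idx
--         for idx in [
--             path_pattern.find("*"),
--             path_pattern.find("?"),
--             path_pattern.find("["),
--         ]
--         if idx != -1
--     ]
--
--     if not wildcard_indices:
--         return path_pattern
--
--     cut_index = min(wildcard_indices)
--     prefix = path_pattern[:cut_index]
--
--     if "/" in prefix:
--         parent = prefix.rsplit("/", 1)[0]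
--         return f"{parent}/" if parent else "/"
--     return prefix
-- ===== SOURCE B (Python) =====
-- def _normalize_watch_target(path_pattern: str) -> str:
--     """Normalize glob path pattern to an audit watch target."""
--     last_slash = -1
--     for i, ch in enumerate(path_pattern):
--         if ch in "*?[":
--             if last_slash >= 0:
--                 return path_pattern[:last_slash] + "/" if last_slash > 0 else "/"
--             return path_pattern[:i]
--         if ch == "/":
--             last_slash = i
--     return path_pattern
-- ===== Notes on version B (the rewrite author's own statement) =====
-- stated objective: simpler
-- what changed: Replaced the three find() scans, the min(), the '/' in prefix membership scan and the rsplit pass by one left-to-right scan that tracks the index of the last '/' seen and stops at the first wildcard.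
import Mathlib
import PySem

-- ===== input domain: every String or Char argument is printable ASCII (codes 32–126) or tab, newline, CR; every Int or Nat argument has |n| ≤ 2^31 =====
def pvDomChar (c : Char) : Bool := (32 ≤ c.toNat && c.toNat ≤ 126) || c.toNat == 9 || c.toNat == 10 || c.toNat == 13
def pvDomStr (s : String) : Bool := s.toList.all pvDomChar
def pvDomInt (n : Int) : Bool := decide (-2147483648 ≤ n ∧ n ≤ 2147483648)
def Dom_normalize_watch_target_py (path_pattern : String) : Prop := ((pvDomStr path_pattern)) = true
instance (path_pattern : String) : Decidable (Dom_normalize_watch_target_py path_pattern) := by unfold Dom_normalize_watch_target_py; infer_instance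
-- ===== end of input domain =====

-- B replaces A's three find() scans, min(), substring membership test and rsplit
-- by one left-to-right scan tracking the last '/' index: simpler single-pass decomposition.


-- ===== PORT A =====
-- prefix.rsplit("/", 1)[0]: everything before the LAST '/' of p; hand port, exact at
-- its only call site, which is guarded by '"/" in prefix'.
def pvBeforeLastSlash (p : List Char) : List Char :=
  match p with
  | [] => []
  | c :: t => if PySem.Chars.isIn ['/'] t then c :: pvBeforeLastSlash t else []

def normalize_watch_target_py (path_pattern : String) : String :=
  let cs := path_pattern.toList
  let wildcard_indices :=
    [PySem.Chars.find cs ['*'], PySem.Chars.find cs ['?'], PySem.Chars.find cs ['[']].filter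
      (fun idx => idx != -1)
  if wildcard_indices = [] then path_pattern
  else
    -- min(wildcard_indices); the list is nonempty here, so the `getD 0` default is unreachable
    let cut_index := (PySem.List.min? wildcard_indices (fun x => x)).getD 0
    let pre := PySem.List.slice cs none (some cut_index)
    if PySem.Chars.isIn ['/'] pre then
      let parent := pvBeforeLastSlash pre
      if parent = [] then String.ofList ['/'] else String.ofList (parent ++ ['/'])
    else String.ofList pre

-- ===== PORT B =====
-- the for-loop of Source B: `rest` is the unscanned suffix, `i` its start index in `full`,
-- `lastSlash` the index of the last '/' seen so far (-1 if none)
def pvAltGo (full : List Char) (rest : List Char) (i : Nat) (lastSlash : Int) : String :=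
  match rest with
  | [] => String.ofList full
  | c :: t =>
    if c = '*' ∨ c = '?' ∨ c = '[' then
      if 0 ≤ lastSlash then
        if 0 < lastSlash then String.ofList (PySem.List.slice full none (some lastSlash) ++ ['/'])
        else String.ofList ['/']
      else String.ofList (PySem.List.slice full none (some (i : Int)))
    else pvAltGo full t (i + 1) (if c = '/' then (i : Int) else lastSlash)

def normalize_watch_target_py_alt (path_pattern : String) : String :=
  pvAltGo path_pattern.toList path_pattern.toList 0 (-1)

-- ===== PRECONDITION & SPEC =====
def Spec_normalize_watch_target_py (path_pattern : String) (out : String) : Prop := out = normalize_watch_target_py_alt path_pattern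
instance (path_pattern : String) (out : String) : Decidable (Spec_normalize_watch_target_py path_pattern out) := by unfold Spec_normalize_watch_target_py; infer_instance

-- ===== CLAIM (what is proved, stated in full; the proofs are below) =====
def Claim_equal_normalize_watch_target_py : Prop := ∀ (path_pattern : String), Dom_normalize_watch_target_py path_pattern → Spec_normalize_watch_target_py path_pattern (normalize_watch_target_py path_pattern)

-- ===== LEMMAS AND PROOFS =====

-- a character is a glob wildcard
def pvWild (c : Char) : Bool := c == '*' || c == '?' || c == '['

-- index of the last '/' in a list, if any
def pvLastIdx? : List Char → Option Nat
  | [] => none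
  | c :: t =>
    match pvLastIdx? t with
    | some j => some (j + 1)
    | none => if c = '/' then some 0 else none

theorem pv_singleton_prefix_iff (a : Char) (l : List Char) : [a] <+: l ↔ l.head? = some a := by
  cases l with
  | nil => simp
  | cons b t => simp [List.cons_prefix_cons, eq_comm]

theorem pv_singleton_infix_iff (a : Char) (l : List Char) : [a] <:+: l ↔ a ∈ l := by
  constructor
  · exact fun h => h.subset (by simp)
  · intro h
    obtain ⟨s, t, rfl⟩ := List.append_of_mem h
    exact ⟨s, t, by simp⟩

theorem pv_isIn_slash (l : List Char) : PySem.Chars.isIn ['/'] l = true ↔ '/' ∈ l := by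
  rw [PySem.Chars.isIn_iff_infix, pv_singleton_infix_iff]

theorem pv_find_singleton (cs : List Char) (x : Char) :
    PySem.Chars.find cs [x] = if x ∈ cs then ((cs.findIdx (· == x) : Nat) : Int) else -1 := by
  by_cases hx : x ∈ cs
  · simp only [hx, if_true]
    have hnn : 0 ≤ PySem.Chars.find cs [x] :=
      (PySem.Chars.find_nonneg_iff cs [x]).2 ((pv_singleton_infix_iff x cs).2 hx)
    obtain ⟨hpre, hmin⟩ := PySem.Chars.find_spec hnn
    set k := (PySem.Chars.find cs [x]).toNat with hk
    have hget : cs[k]? = some x := by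
      have := (pv_singleton_prefix_iff x _).1 hpre
      rwa [List.head?_drop] at this
    obtain ⟨hklen, hgetE⟩ := List.getElem?_eq_some_iff.1 hget
    have hfi_lt : cs.findIdx (· == x) < cs.length :=
      List.findIdx_lt_length.2 ⟨x, hx, by simp⟩
    have h1 : cs.findIdx (· == x) ≤ k := by
      by_contra h
      have := List.not_of_lt_findIdx (p := (· == x)) (xs := cs) (i := k) (by omega)
      simp at this
      exact this hgetE
    have h2 : k ≤ cs.findIdx (· == x) := by
      by_contra h
      apply hmin (cs.findIdx (· == x)) (by omega)
      rw [pv_singleton_prefix_iff, List.head?_drop, List.getElem?_eq_getElem hfi_lt]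
      have := List.findIdx_getElem (w := hfi_lt) (p := (· == x))
      exact congrArg some (by simpa using this)
    have : k = cs.findIdx (· == x) := le_antisymm h2 h1
    omega
  · simp only [hx, if_false]
    exact (PySem.Chars.find_eq_neg_one_iff cs [x]).2
      (fun h => hx ((pv_singleton_infix_iff x cs).1 h))

theorem pv_lastIdx?_eq_none_iff (p : List Char) : pvLastIdx? p = none ↔ '/' ∉ p := by
  induction p with
  | nil => simp [pvLastIdx?]
  | cons c t ih =>
    simp only [pvLastIdx?]
    cases h : pvLastIdx? t with
    | some j =>
      have hmem : '/' ∈ t := by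
        by_contra hn
        rw [ih.2 hn] at h; exact absurd h (by simp)
      simp [hmem]
    | none =>
      have hnm : '/' ∉ t := ih.1 h
      by_cases hc : c = '/' <;> simp [hc, hnm, eq_comm]

theorem pv_lastIdx?_lt (p : List Char) (j : Nat) (h : pvLastIdx? p = some j) : j < p.length := by
  induction p generalizing j with
  | nil => simp [pvLastIdx?] at h
  | cons c t ih =>
    simp only [pvLastIdx?] at h
    cases ht : pvLastIdx? t with
    | some j' =>
      rw [ht] at h
      have := ih j' ht
      simp only [Option.some.injEq] at h
      simp only [List.length_cons]
      omega
    | none =>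
      rw [ht] at h
      by_cases hc : c = '/'
      · simp [hc] at h
        simp [← h]
      · simp [hc] at h

theorem pv_beforeLast_eq_take (p : List Char) (j : Nat) (h : pvLastIdx? p = some j) :
    pvBeforeLastSlash p = p.take j := by
  induction p generalizing j with
  | nil => simp [pvLastIdx?] at h
  | cons c t ih =>
    simp only [pvLastIdx?] at h
    cases ht : pvLastIdx? t with
    | some j' =>
      rw [ht] at h
      simp only [Option.some.injEq] at h
      have hmem : '/' ∈ t := by
        by_contra hn
        rw [(pv_lastIdx?_eq_none_iff t).2 hn] at ht; exact absurd ht (by simp)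
      simp [pvBeforeLastSlash, (pv_isIn_slash t).2 hmem, ← h, ih j' ht]
    | none =>
      rw [ht] at h
      have hnm : '/' ∉ t := (pv_lastIdx?_eq_none_iff t).1 ht
      by_cases hc : c = '/'
      · have hj : j = 0 := by simp [hc] at h; omega
        have hI : PySem.Chars.isIn ['/'] t = false := by
          cases hI : PySem.Chars.isIn ['/'] t
          · rfl
          · exact absurd ((pv_isIn_slash t).1 hI) hnm
        simp [pvBeforeLastSlash, hI, hj]
      · simp [hc] at h

-- what the scan loop computes, in closed form
theorem pv_altGo_spec (rest : List Char) : ∀ (full : List Char) (i : Nat) (ls : Int),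
    pvAltGo full rest i ls =
      match rest.findIdx? pvWild with
      | none => String.ofList full
      | some k =>
        let ls' : Int := match pvLastIdx? (rest.take k) with
          | none => ls
          | some j => ((i + j : Nat) : Int)
        if 0 ≤ ls' then
          if 0 < ls' then String.ofList (PySem.List.slice full none (some ls') ++ ['/'])
          else String.ofList ['/']
        else String.ofList (PySem.List.slice full none (some ((i + k : Nat) : Int))) := by
  induction rest with
  | nil => intro full i ls; simp [pvAltGo]
  | cons c t ih =>
    intro full i ls
    by_cases hw : c = '*' ∨ c = '?' ∨ c = '['
    · have hwb : pvWild c = true := by rcases hw with h | h | h <;> simp [pvWild, h]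
      simp [pvAltGo, hw, List.findIdx?_cons, hwb, pvLastIdx?]
    · have hwb : pvWild c = false := by
        push Not at hw
        simp [pvWild, hw.1, hw.2.1, hw.2.2]
      rw [pvAltGo]
      simp only [if_neg hw]
      rw [ih full (i + 1) (if c = '/' then (i : Int) else ls)]
      simp only [List.findIdx?_cons, hwb, Bool.false_eq_true, if_false]
      cases hf : t.findIdx? pvWild with
      | none => simp
      | some k =>
        simp only [Option.map_some]
        have htake : (c :: t).take (k + 1) = c :: t.take k := by simp
        show _ = (match some (k + 1) with
          | none => String.ofList full
          | some k => _)
        simp only [htake, pvLastIdx?]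
        cases hL : pvLastIdx? (t.take k) with
        | some j =>
          have hj : i + (j + 1) = i + 1 + j := by omega
          have hk2 : i + (k + 1) = i + 1 + k := by omega
          simp [hj, hk2]
        | none =>
          by_cases hc : c = '/'
          · simp [hc]
          · have hk2 : i + (k + 1) = i + 1 + k := by omega
            simp [hc, hk2]

theorem pv_findIdx_beq_ge (cs : List Char) (x : Char) (hx : pvWild x = true) (hmem : x ∈ cs) :
    cs.findIdx pvWild ≤ cs.findIdx (· == x) ∧ cs.findIdx (· == x) < cs.length := by
  have hlt : cs.findIdx (· == x) < cs.length := List.findIdx_lt_length.2 ⟨x, hmem, by simp⟩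
  refine ⟨?_, hlt⟩
  by_contra h
  have hfalse := List.not_of_lt_findIdx (p := pvWild) (xs := cs)
    (i := cs.findIdx (· == x)) (by omega)
  have heq : cs[cs.findIdx (· == x)] = x := by
    simpa using List.findIdx_getElem (w := hlt) (p := (· == x))
  have hxf : pvWild x = false := by
    rw [← heq]
    exact hfalse
  rw [hx] at hxf
  exact absurd hxf (by simp)

theorem pv_find_at_k (cs : List Char) (hklen : cs.findIdx pvWild < cs.length)
    (hwk : pvWild (cs[cs.findIdx pvWild]'hklen) = true) :
    PySem.Chars.find cs [cs[cs.findIdx pvWild]'hklen] = ((cs.findIdx pvWild : Nat) : Int) := by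
  have hmem : cs[cs.findIdx pvWild]'hklen ∈ cs := List.getElem_mem hklen
  rw [pv_find_singleton, if_pos hmem]
  obtain ⟨hge, hlt⟩ := pv_findIdx_beq_ge cs _ hwk hmem
  have hle : cs.findIdx (· == cs[cs.findIdx pvWild]'hklen) ≤ cs.findIdx pvWild := by
    by_contra h
    have := List.not_of_lt_findIdx (p := (· == cs[cs.findIdx pvWild]'hklen)) (xs := cs)
      (i := cs.findIdx pvWild) (by omega)
    simp at this
    exact this rfl
  have : cs.findIdx (· == cs[cs.findIdx pvWild]'hklen) = cs.findIdx pvWild :=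
    le_antisymm hle hge
  rw [this]

theorem pv_ge_k (cs : List Char) (x : Char) (hx : pvWild x = true)
    (hne : PySem.Chars.find cs [x] ≠ -1) :
    ((cs.findIdx pvWild : Nat) : Int) ≤ PySem.Chars.find cs [x] := by
  rw [pv_find_singleton] at hne ⊢
  by_cases hmem : x ∈ cs
  · rw [if_pos hmem]
    obtain ⟨hge, _⟩ := pv_findIdx_beq_ge cs x hx hmem
    exact_mod_cast hge
  · rw [if_neg hmem] at hne
    exact absurd rfl hne

theorem pv_main (s : String) : normalize_watch_target_py s = normalize_watch_target_py_alt s := by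
  unfold normalize_watch_target_py normalize_watch_target_py_alt
  rw [pv_altGo_spec]
  simp only []
  cases hF : s.toList.findIdx? pvWild with
  | none =>
    have hall := List.findIdx?_eq_none_iff.1 hF
    have hstar : '*' ∉ s.toList := fun h => by simpa [pvWild] using hall _ h
    have hq : '?' ∉ s.toList := fun h => by simpa [pvWild] using hall _ h
    have hlb : '[' ∉ s.toList := fun h => by simpa [pvWild] using hall _ h
    simp [pv_find_singleton, hstar, hq, hlb, String.ofList_toList]
  | some k =>
    obtain ⟨hklen, rfl⟩ := List.findIdx?_eq_some_iff_findIdx_eq.1 hF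
    have hwk : pvWild (s.toList[s.toList.findIdx pvWild]'hklen) = true :=
      List.findIdx_getElem (w := hklen)
    have hfk := pv_find_at_k s.toList hklen hwk
    have hxcases : s.toList[s.toList.findIdx pvWild]'hklen = '*' ∨
        s.toList[s.toList.findIdx pvWild]'hklen = '?' ∨
        s.toList[s.toList.findIdx pvWild]'hklen = '[' := by
      have := hwk
      simp [pvWild] at this
      tauto
    have hmemwi : ((s.toList.findIdx pvWild : Nat) : Int) ∈
        ([PySem.Chars.find s.toList ['*'], PySem.Chars.find s.toList ['?'],
          PySem.Chars.find s.toList ['[']].filter (fun idx => idx != -1)) := by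
      rw [List.mem_filter]
      refine ⟨?_, by simp⟩
      rcases hxcases with h | h | h <;> rw [← h] <;> simp [hfk]
    have hlbv : ∀ v ∈ ([PySem.Chars.find s.toList ['*'], PySem.Chars.find s.toList ['?'],
          PySem.Chars.find s.toList ['[']].filter (fun idx => idx != -1)),
        ((s.toList.findIdx pvWild : Nat) : Int) ≤ v := by
      intro v hv
      rw [List.mem_filter] at hv
      obtain ⟨hvmem, hvne⟩ := hv
      simp only [List.mem_cons, List.not_mem_nil, or_false] at hvmem
      have hvne' : v ≠ -1 := by simpa using hvne
      rcases hvmem with rfl | rfl | rfl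
      · exact pv_ge_k s.toList '*' (by decide) hvne'
      · exact pv_ge_k s.toList '?' (by decide) hvne'
      · exact pv_ge_k s.toList '[' (by decide) hvne'
    have hnewi : ([PySem.Chars.find s.toList ['*'], PySem.Chars.find s.toList ['?'],
          PySem.Chars.find s.toList ['[']].filter (fun idx => idx != -1)) ≠ [] := by
      intro h
      rw [h] at hmemwi
      simp at hmemwi
    have hmin : PySem.List.min? ([PySem.Chars.find s.toList ['*'], PySem.Chars.find s.toList ['?'],
          PySem.Chars.find s.toList ['[']].filter (fun idx => idx != -1)) (fun x => x) =
        some ((s.toList.findIdx pvWild : Nat) : Int) := by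
      cases hm : PySem.List.min? ([PySem.Chars.find s.toList ['*'], PySem.Chars.find s.toList ['?'],
          PySem.Chars.find s.toList ['[']].filter (fun idx => idx != -1)) (fun x => x) with
      | none => exact absurd ((PySem.List.min?_eq_none_iff _ _).1 hm) hnewi
      | some m =>
        have h1 := PySem.List.min?_mem hm
        have h2 := PySem.List.min?_isMin hm _ hmemwi
        have h3 := hlbv m h1
        rw [le_antisymm h2 h3]
    rw [if_neg hnewi, hmin]
    simp only [Option.getD_some]
    rw [PySem.List.slice_to_natCast]
    by_cases hsl : '/' ∈ s.toList.take (s.toList.findIdx pvWild)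
    · obtain ⟨j, hj⟩ : ∃ j, pvLastIdx? (s.toList.take (s.toList.findIdx pvWild)) = some j := by
        cases hL : pvLastIdx? (s.toList.take (s.toList.findIdx pvWild)) with
        | none => exact absurd ((pv_lastIdx?_eq_none_iff _).1 hL) (not_not_intro hsl)
        | some j => exact ⟨j, rfl⟩
      have hjlt := pv_lastIdx?_lt _ _ hj
      have hjk : j ≤ s.toList.findIdx pvWild := by
        rw [List.length_take] at hjlt
        omega
      rw [if_pos ((pv_isIn_slash _).2 hsl)]
      rw [pv_beforeLast_eq_take _ _ hj, hj, List.take_take]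
      have hmin' : min j (s.toList.findIdx pvWild) = j := by omega
      rw [hmin']
      have hcsne : s.toList ≠ [] := by
        intro h
        rw [h] at hsl
        simp at hsl
      by_cases hj0 : j = 0
      · subst hj0
        simp
      · rw [if_neg (by simp [List.take_eq_nil_iff, hj0, hcsne])]
        have hjpos : (0 : Int) < ((0 + j : Nat) : Int) := by omega
        simp only [Nat.zero_add] at hjpos ⊢
        rw [if_pos (le_of_lt hjpos), if_pos hjpos, PySem.List.slice_to_natCast]
    · rw [(pv_lastIdx?_eq_none_iff _).2 hsl]
      have hIf : PySem.Chars.isIn ['/'] (s.toList.take (s.toList.findIdx pvWild)) = false := by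
        cases hI : PySem.Chars.isIn ['/'] (s.toList.take (s.toList.findIdx pvWild))
        · rfl
        · exact absurd ((pv_isIn_slash _).1 hI) hsl
      rw [hIf]
      simp [PySem.List.slice_to_natCast]

-- ===== VERDICT (by name: the statement is the Claim_ definition above) =====
theorem normalize_watch_target_py_spec : Claim_equal_normalize_watch_target_py := by
  intro s _
  exact pv_main s
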